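-- pv_equiv track=rewrite | github.com/sgundu-doosratake/Python_Coding | Mark_7/module3.py | count
-- ===== SOURCE A (Python) =====
-- def count(lst):
--
--     odd = 0
--     even = 0
--
--     for i in lst:
--         if len(i)>5:
--             odd = odd + 1
--         else:
--             even = even +1
--
--     return(even,odd)
-- ===== SOURCE B (Python) =====
-- def count(lst):
--     if len(lst) == 0:
--         return (0, 0)
--     if len(lst) == 1:
--         return (0, 1) if len(lst[0]) > 5 else (1, 0)
--     mid = len(lst) // 2
--     e1, o1 = count(lst[:mid])
--     e2, o2 = count(lst[mid:])
--     return (e1 + e2, o1 + o2)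
-- ===== Notes on version B (the rewrite author's own statement) =====
-- stated objective: alternative
-- what changed: B replaces A's single accumulator loop with a divide-and-conquer recursion: split the list in half, count each half recursively, and combine by componentwise tuple addition.
import Mathlib
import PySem

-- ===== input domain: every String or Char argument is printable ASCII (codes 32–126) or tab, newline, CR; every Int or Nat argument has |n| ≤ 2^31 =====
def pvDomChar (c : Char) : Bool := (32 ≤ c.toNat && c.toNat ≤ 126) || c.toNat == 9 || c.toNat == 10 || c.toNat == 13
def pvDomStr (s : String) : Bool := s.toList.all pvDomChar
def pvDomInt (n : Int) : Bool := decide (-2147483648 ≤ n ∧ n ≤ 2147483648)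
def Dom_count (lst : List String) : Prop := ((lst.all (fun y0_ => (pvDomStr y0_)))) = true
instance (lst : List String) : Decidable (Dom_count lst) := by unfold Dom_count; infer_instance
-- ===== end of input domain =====

-- B replaces A's single two-counter loop by a divide-and-conquer recursion (split in half,
-- count halves, add componentwise); objective: alternative structure, same result.

-- ===== PORT A =====
def count (lst : List String) : Int × Int :=
  -- odd/even accumulated over the loop, returned as (even, odd)
  let p := lst.foldl (fun (st : Int × Int) i =>
    if 5 < PySem.Str.len i then (st.1 + 1, st.2) else (st.1, st.2 + 1)) (0, 0)
  (p.2, p.1)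

-- ===== PORT B =====
def count_alt (lst : List String) : Int × Int :=
  if _h0 : lst.length = 0 then (0, 0)
  else if _h1 : lst.length = 1 then
    -- len(lst[0]) > 5 ; lst is nonempty here so lst[0] is its head
    if 5 < PySem.Str.len (lst.headI) then (0, 1) else (1, 0)
  else
    let mid := lst.length / 2
    let p1 := count_alt (PySem.List.slice lst none (some (mid : Int)))   -- lst[:mid]
    let p2 := count_alt (PySem.List.slice lst (some (mid : Int)) none)   -- lst[mid:]
    (p1.1 + p2.1, p1.2 + p2.2)
termination_by lst.length
decreasing_by
  all_goals simp only [PySem.List.slice_to_natCast, PySem.List.slice_from_natCast,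
    List.length_take, List.length_drop]
  all_goals omega

-- ===== PRECONDITION & SPEC =====
def Spec_count (lst : List String) (out : Int × Int) : Prop := out = count_alt lst
instance (lst : List String) (out : Int × Int) : Decidable (Spec_count lst out) := by unfold Spec_count; infer_instance

-- ===== CLAIM (what is proved, stated in full; the proofs are below) =====
def Claim_equal_count : Prop := ∀ (lst : List String), Dom_count lst → Spec_count lst (count lst)

-- ===== LEMMAS AND PROOFS =====

-- A's fold, started from any state, adds the two filter-counts componentwise.
theorem count_fold (lst : List String) : ∀ (a b : Int),
    lst.foldl (fun (st : Int × Int) i =>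
      if 5 < PySem.Str.len i then (st.1 + 1, st.2) else (st.1, st.2 + 1)) (a, b)
    = (a + ((lst.filter (fun i => 5 < PySem.Str.len i)).length : Int),
       b + ((lst.filter (fun i => ¬ 5 < PySem.Str.len i)).length : Int)) := by
  induction lst with
  | nil => intro a b; simp
  | cons x xs ih =>
    intro a b
    by_cases hx : 5 < PySem.Str.len x
    · rw [List.foldl_cons, if_pos hx]
      rw [show ((a,b).1 + 1, (a,b).2) = ((a+1 : Int), b) from rfl, ih]
      simp only [List.filter_cons, hx, decide_true, decide_not, Bool.not_true,
        Bool.false_eq_true, if_true, if_false, List.length_cons, Prod.mk.injEq]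
      push_cast
      exact ⟨by ring, trivial⟩
    · rw [List.foldl_cons, if_neg hx]
      rw [show ((a,b).1, (a,b).2 + 1) = ((a : Int), (b+1:Int)) from rfl, ih]
      simp only [List.filter_cons, hx, decide_false, decide_not, Bool.not_false,
        Bool.false_eq_true, if_true, if_false, List.length_cons, Prod.mk.injEq]
      push_cast
      exact ⟨trivial, by ring⟩

-- A's result characterised: (count of strings with len ≤ 5, count of strings with len > 5).
theorem count_char (lst : List String) :
    count lst = (((lst.filter (fun i => ¬ 5 < PySem.Str.len i)).length : Int),
                 ((lst.filter (fun i => 5 < PySem.Str.len i)).length : Int)) := by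
  simp only [count]
  rw [count_fold lst 0 0]
  simp

theorem count_append (l1 l2 : List String) :
    count (l1 ++ l2) = ((count l1).1 + (count l2).1, (count l1).2 + (count l2).2) := by
  simp [count_char]

theorem count_alt_eq_aux : ∀ (n : Nat) (lst : List String), lst.length ≤ n →
    count_alt lst = count lst := by
  intro n
  induction n with
  | zero =>
    intro lst h
    have : lst = [] := List.eq_nil_of_length_eq_zero (Nat.le_zero.mp h)
    subst this; simp [count_alt, count]
  | succ n ih =>
    intro lst h
    rw [count_alt]
    by_cases h0 : lst.length = 0
    · have : lst = [] := List.eq_nil_of_length_eq_zero h0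
      subst this; simp [count]
    · by_cases h1 : lst.length = 1
      · obtain ⟨x, hx⟩ : ∃ x, lst = [x] := List.length_eq_one_iff.mp h1
        subst hx
        rw [dif_neg h0, dif_pos h1]
        simp only [List.headI]
        rw [count_char]
        by_cases hl : 5 < PySem.Str.len x
        · rw [if_pos hl]
          have hl' : ¬ x.length ≤ 5 := by
            have : (5:Int) < (x.length : Int) := by simpa using hl
            omega
          simp [hl', Nat.lt_of_not_le hl']
        · rw [if_neg hl]
          have hl' : x.length ≤ 5 := by
            have : ¬ (5:Int) < (x.length : Int) := by simpa using hl
            omega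
          simp [hl', Nat.not_lt.mpr hl']
      · have h2 : 2 ≤ lst.length := by omega
        have hmid1 : 1 ≤ lst.length / 2 := by omega
        have hmid2 : lst.length / 2 < lst.length := by omega
        simp only [h0, h1, dite_false]
        rw [PySem.List.slice_to_natCast, PySem.List.slice_from_natCast]
        rw [ih _ (by simp; omega), ih _ (by simp; omega)]
        have := count_append (lst.take (lst.length / 2)) (lst.drop (lst.length / 2))
        rw [List.take_append_drop] at this
        rw [this]

-- ===== VERDICT (by name: the statement is the Claim_ definition above) =====
theorem count_spec : Claim_equal_count := by
  intro lst _
  unfold Spec_count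
  exact (count_alt_eq_aux lst.length lst le_rfl).symm
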